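-- pv_equiv track=rewrite | github.com/Serosales/TP-AyED1-2024 | TP-04/EJ7.py | eliminar_sin_rebanadas
-- ===== SOURCE A (Python) =====
-- def eliminar_sin_rebanadas(cadena: str, posicion: int, cantidad: int) -> str:
--     """
--     CONTRATO:
--     Elimina una subcadena de la cadena original desde la posición especificada
--     hasta la posición + cantidad sin utilizar rebanadas.
--
--     PRE:
--       "cadena" debe ser no vacía.
--       "posicion" debe ser mayor o igual  0 y menor que la  longitud de cadena.
--       "cantidad" debe ser mayor o igual  0.
--
--     POST:
--      Devuelve la cadena resultante después de la eliminación.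
--      Si la cadena es de valor 0 devuelve la cadena original.
--     """
--     if cantidad > 0:  # Si la cantidad es positiva
--         salida = ''
--         for i in range(len(cadena)):
--             if i < posicion or i >= (posicion + cantidad):
--                 salida += cadena[i]
--         return salida
--     return cadena
-- ===== SOURCE B (Python) =====
-- def eliminar_sin_rebanadas(cadena: str, posicion: int, cantidad: int) -> str:
--     # Closed slice form: clamp the cut interval [lo, hi) to valid bounds,
--     # then rejoin the two remaining pieces. No per-character loop.
--     lo = max(posicion, 0)
--     hi = max(posicion + cantidad, lo)
--     return cadena[:lo] + cadena[hi:]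
-- ===== Notes on version B (the rewrite author's own statement) =====
-- stated objective: faster
-- what changed: Replaces the per-character index-tested accumulation loop (quadratic string concatenation) with a closed slice form: clamp the cut interval and concatenate the prefix before it with the suffix after it.
import Mathlib
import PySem

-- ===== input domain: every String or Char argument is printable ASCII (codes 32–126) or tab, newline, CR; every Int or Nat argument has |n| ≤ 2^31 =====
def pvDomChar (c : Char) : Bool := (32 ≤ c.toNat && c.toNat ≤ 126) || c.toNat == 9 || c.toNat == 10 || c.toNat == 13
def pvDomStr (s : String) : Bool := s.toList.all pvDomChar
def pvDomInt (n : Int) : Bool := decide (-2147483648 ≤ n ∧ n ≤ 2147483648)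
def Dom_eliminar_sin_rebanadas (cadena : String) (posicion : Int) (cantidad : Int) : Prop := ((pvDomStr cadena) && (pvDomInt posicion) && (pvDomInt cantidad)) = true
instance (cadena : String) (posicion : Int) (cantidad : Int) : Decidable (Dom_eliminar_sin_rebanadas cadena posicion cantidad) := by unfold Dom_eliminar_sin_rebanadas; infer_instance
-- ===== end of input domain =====

-- B replaces A's per-character index-tested accumulation loop with a closed slice form
-- (clamped cut bounds, prefix ++ suffix), avoiding the quadratic character-by-character rebuild.

-- ===== PORT A =====
-- literal port: if cantidad > 0, fold over range(len(cadena)) appending cadena[i]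
-- when i < posicion or i >= posicion + cantidad; else return cadena unchanged.
def eliminar_sin_rebanadas (cadena : String) (posicion : Int) (cantidad : Int) : String :=
  if cantidad > 0 then
    let salida : List Char :=
      (PySem.List.pyRange 0 (cadena.toList.length : Int) 1).foldl
        (fun salida i =>
          if i < posicion ∨ posicion + cantidad ≤ i then
            salida ++ [PySem.List.pyGetD cadena.toList i ' ']
          else salida) []
    String.ofList salida
  else cadena

-- ===== PORT B =====
-- literal port of Source B: lo = max(posicion, 0); hi = max(posicion + cantidad, lo);
-- return cadena[:lo] + cadena[hi:]
def eliminar_sin_rebanadas_alt (cadena : String) (posicion : Int) (cantidad : Int) : String :=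
  let lo : Int := max posicion 0
  let hi : Int := max (posicion + cantidad) lo
  String.ofList
    (PySem.List.slice cadena.toList none (some lo) ++
     PySem.List.slice cadena.toList (some hi) none)

-- ===== PRECONDITION & SPEC =====
def Spec_eliminar_sin_rebanadas (cadena : String) (posicion : Int) (cantidad : Int) (out : String) : Prop := out = eliminar_sin_rebanadas_alt cadena posicion cantidad
instance (cadena : String) (posicion : Int) (cantidad : Int) (out : String) : Decidable (Spec_eliminar_sin_rebanadas cadena posicion cantidad out) := by unfold Spec_eliminar_sin_rebanadas; infer_instance

-- ===== CLAIM (what is proved, stated in full; the proofs are below) =====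
def Claim_equal_eliminar_sin_rebanadas : Prop := ∀ (cadena : String) (posicion : Int) (cantidad : Int), Dom_eliminar_sin_rebanadas cadena posicion cantidad → Spec_eliminar_sin_rebanadas cadena posicion cantidad (eliminar_sin_rebanadas cadena posicion cantidad)

-- ===== LEMMAS AND PROOFS =====

-- range' segment mapped through getD is a contiguous piece of the list
lemma map_getD_range' (l : List Char) (s m : Nat) (h : s + m ≤ l.length) (d : Char) :
    (List.range' s m).map (fun k => l.getD k d) = (l.drop s).take m := by
  apply List.ext_getElem
  · simp; omega
  · intro i hi1 hi2
    simp only [List.getElem_map, List.getElem_range', List.getElem_take, List.getElem_drop]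
    rw [List.getD_eq_getElem l d (by simp at hi1; omega)]
    congr 1
    omega

-- the filtered index range splits into the kept prefix and kept suffix
lemma filter_range_split (n a b : Nat) (hab : a ≤ b) :
    (List.range n).filter (fun k => decide (k < a ∨ b ≤ k)) =
      List.range' 0 (min a n) ++ List.range' (min b n) (n - min b n) := by
  have e1 : List.range' 0 (min a n) ++ List.range' (0 + min a n) (min b n - min a n) =
      List.range' 0 (min a n + (min b n - min a n)) := List.range'_append_1
  have e2 : List.range' 0 (min b n) ++ List.range' (0 + min b n) (n - min b n) =
      List.range' 0 (min b n + (n - min b n)) := List.range'_append_1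
  simp only [Nat.zero_add] at e1 e2
  rw [show min a n + (min b n - min a n) = min b n from by omega] at e1
  rw [show min b n + (n - min b n) = n from by omega] at e2
  have hsplit : List.range n =
      List.range' 0 (min a n) ++ List.range' (min a n) (min b n - min a n) ++
        List.range' (min b n) (n - min b n) := by
    rw [List.range_eq_range', e1, e2]
  rw [hsplit, List.filter_append, List.filter_append]
  have h1 : (List.range' 0 (min a n)).filter (fun k => decide (k < a ∨ b ≤ k)) =
      List.range' 0 (min a n) := by
    apply List.filter_eq_self.mpr
    intro k hk
    simp only [List.mem_range'] at hk
    simp only [decide_eq_true_eq]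
    omega
  have h2 : (List.range' (min a n) (min b n - min a n)).filter (fun k => decide (k < a ∨ b ≤ k)) = [] := by
    apply List.filter_eq_nil_iff.mpr
    intro k hk
    simp only [List.mem_range'] at hk
    simp only [decide_eq_true_eq]
    omega
  have h3 : (List.range' (min b n) (n - min b n)).filter (fun k => decide (k < a ∨ b ≤ k)) =
      List.range' (min b n) (n - min b n) := by
    apply List.filter_eq_self.mpr
    intro k hk
    simp only [List.mem_range'] at hk
    simp only [decide_eq_true_eq]
    omega
  rw [h1, h2, h3, List.append_nil]

-- core: A's loop output equals the clamped prefix ++ suffix, at the list level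
lemma loop_eq_slices (l : List Char) (pos cant : Int) :
    ((List.range l.length).filter
        (fun (k : Nat) => decide ((k : Int) < pos ∨ pos + cant ≤ (k : Int)))).map
      (fun k => l.getD k ' ')
    = l.take (max pos 0).toNat ++ l.drop (max (pos + cant) (max pos 0)).toNat := by
  set a : Nat := (max pos 0).toNat with ha
  set b : Nat := (max (pos + cant) (max pos 0)).toNat with hb
  have hab : a ≤ b := by omega
  set n : Nat := l.length with hn
  have hcond : (List.range n).filter (fun (k : Nat) => decide ((k : Int) < pos ∨ pos + cant ≤ (k : Int))) =
      (List.range n).filter (fun k => decide (k < a ∨ b ≤ k)) := by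
    apply List.filter_congr
    intro k hk
    simp only [decide_eq_decide]
    omega
  rw [hcond, filter_range_split n a b hab, List.map_append,
      map_getD_range' l 0 (min a n) (by omega) ' ',
      map_getD_range' l (min b n) (n - min b n) (by omega) ' ',
      List.drop_zero]
  congr 1
  · have hm : min (min a n) l.length = min a l.length := by omega
    rw [List.take_eq_take_min, hm, ← List.take_eq_take_min]
  · rcases Nat.le_total b n with h | h
    · rw [Nat.min_eq_left h]
      rw [List.take_of_length_le (by simp; omega)]
    · rw [Nat.min_eq_right h, List.drop_of_length_le (by omega),
          List.drop_of_length_le (by omega)]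
      simp

-- ===== VERDICT (by name: the statement is the Claim_ definition above) =====
theorem eliminar_sin_rebanadas_spec : Claim_equal_eliminar_sin_rebanadas := by
  intro cadena posicion cantidad _
  unfold Spec_eliminar_sin_rebanadas eliminar_sin_rebanadas eliminar_sin_rebanadas_alt
  dsimp only
  set l : List Char := cadena.toList with hl
  have hlo : (0 : Int) ≤ max posicion 0 := le_max_right _ _
  have hhi : (0 : Int) ≤ max (posicion + cantidad) (max posicion 0) :=
    le_trans hlo (le_max_right _ _)
  rw [PySem.List.slice_to _ hlo, PySem.List.slice_from _ hhi]
  by_cases hc : cantidad > 0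
  · rw [if_pos hc]
    have hfold :
        (PySem.List.pyRange 0 (l.length : Int) 1).foldl
          (fun salida i =>
            if i < posicion ∨ posicion + cantidad ≤ i then
              salida ++ [PySem.List.pyGetD l i ' ']
            else salida) []
        = ((List.range l.length).filter
            (fun (k : Nat) => decide ((k : Int) < posicion ∨ posicion + cantidad ≤ (k : Int)))).map
            (fun k => l.getD k ' ') := by
      rw [show (PySem.List.pyRange 0 (l.length : Int) 1) =
            (List.range l.length).map (fun k : Nat => (k : Int)) from by
        rw [PySem.List.pyRange_one]
        simp only [Int.sub_zero, Int.toNat_natCast]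
        exact List.map_congr_left (fun k _ => by simp)]
      rw [List.foldl_map]
      rw [show (fun (salida : List Char) (k : Nat) =>
            if (k : Int) < posicion ∨ posicion + cantidad ≤ (k : Int) then
              salida ++ [PySem.List.pyGetD l (k : Int) ' ']
            else salida)
          = (fun (salida : List Char) (k : Nat) =>
            if (fun (k : Nat) => decide ((k : Int) < posicion ∨ posicion + cantidad ≤ (k : Int))) k then
              salida ++ [(fun k => l.getD k ' ') k]
            else salida) from by
        funext salida k
        simp [PySem.List.pyGetD_natCast]]
      rw [PySem.List.foldl_append_if]
      simp
    rw [hfold, loop_eq_slices l posicion cantidad]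
  · rw [if_neg hc]
    have hc' : cantidad ≤ 0 := not_lt.mp hc
    have hhi' : max (posicion + cantidad) (max posicion 0) = max posicion 0 := by omega
    rw [hhi', List.take_append_drop]
    exact String.ofList_toList.symm
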